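-- pv_equiv track=rewrite | github.com/RubenSatorra/haberlas | dados.py | puntuar
-- ===== SOURCE A (Python) =====
-- def puntuar(lista):
--     puntillos = 0
--     for elemento in lista:
--         if elemento == 1:
--             puntillos+=100
--         elif elemento == 5:
--             puntillos+=50
--     return puntillos
-- ===== SOURCE B (Python) =====
-- _PUNTOS = {1: 100, 5: 50}
--
-- def puntuar(lista):
--     # divide and conquer: split the list in half, score halves recursively;
--     # a singleton is scored by a weight-table lookup
--     n = len(lista)
--     if n == 0:
--         return 0
--     if n == 1:
--         return _PUNTOS.get(lista[0], 0)
--     m = n // 2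
--     return puntuar(lista[:m]) + puntuar(lista[m:])
-- ===== Notes on version B (the rewrite author's own statement) =====
-- stated objective: alternative
-- what changed: B scores the list by divide-and-conquer: it recursively splits the list in half and sums the two halves' scores, a singleton being scored by a weight-table lookup, instead of A's single left-to-right accumulating loop.
import Mathlib
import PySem

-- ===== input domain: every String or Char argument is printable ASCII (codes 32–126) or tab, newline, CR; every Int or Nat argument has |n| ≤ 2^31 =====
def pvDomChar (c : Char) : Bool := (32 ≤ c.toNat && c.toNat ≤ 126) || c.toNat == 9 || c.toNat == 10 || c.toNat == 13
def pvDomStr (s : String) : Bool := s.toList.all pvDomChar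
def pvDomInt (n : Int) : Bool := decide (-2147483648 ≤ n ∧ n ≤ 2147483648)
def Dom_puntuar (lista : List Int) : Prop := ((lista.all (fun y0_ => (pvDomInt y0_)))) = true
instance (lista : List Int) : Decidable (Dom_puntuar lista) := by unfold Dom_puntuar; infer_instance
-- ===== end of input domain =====

-- B scores the list by divide-and-conquer (split in half, recurse, singleton scored via a weight-table lookup) instead of A's single accumulating loop; objective: alternative algorithm, same result.


-- ===== PORT A =====
def puntuar (lista : List Int) : Int :=
  lista.foldl (fun puntillos elemento =>
    if elemento == 1 then puntillos + 100
    else if elemento == 5 then puntillos + 50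
    else puntillos) 0

-- ===== PORT B =====
-- the module-level weight table _PUNTOS = {1: 100, 5: 50}
def pvPuntos : PySem.Dict Int Int :=
  (PySem.Dict.empty.insert 1 100).insert 5 50

-- B: divide and conquer; singleton scored by _PUNTOS.get(lista[0], 0)
def puntuar_alt (lista : List Int) : Int :=
  if lista.length = 0 then 0
  else if lista.length = 1 then
    match PySem.List.pyGet? lista 0 with
    | some x => PySem.Dict.getD pvPuntos x 0
    | none => 0          -- unreachable: length = 1
  else
    let m : Int := PySem.Int.floordiv (lista.length : Int) 2
    puntuar_alt (PySem.List.slice lista none (some m)) +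
    puntuar_alt (PySem.List.slice lista (some m) none)
termination_by lista.length
decreasing_by
  all_goals
    rw [show PySem.Int.floordiv ((lista.length : Int)) 2 = ((lista.length / 2 : Nat) : Int) from
          PySem.Int.floordiv_natCast _ 2]
    first
      | rw [PySem.List.slice_to_natCast]; simp only [List.length_take]; omega
      | rw [PySem.List.slice_from_natCast]; simp only [List.length_drop]; omega

-- ===== PRECONDITION & SPEC =====
def Spec_puntuar (lista : List Int) (out : Int) : Prop := out = puntuar_alt lista
instance (lista : List Int) (out : Int) : Decidable (Spec_puntuar lista out) := by unfold Spec_puntuar; infer_instance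

-- ===== CLAIM (what is proved, stated in full; the proofs are below) =====
def Claim_equal_puntuar : Prop := ∀ (lista : List Int), Dom_puntuar lista → Spec_puntuar lista (puntuar lista)

-- ===== LEMMAS AND PROOFS =====

-- A's accumulator is 100*(count of 1s) + 50*(count of 5s)
lemma foldA_eq (lista : List Int) (acc : Int) :
    lista.foldl (fun puntillos elemento =>
      if elemento == 1 then puntillos + 100
      else if elemento == 5 then puntillos + 50
      else puntillos) acc = acc + 100 * (lista.count 1 : Int) + 50 * (lista.count 5 : Int) := by
  induction lista generalizing acc with
  | nil => simp
  | cons x xs ih =>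
    simp only [List.foldl_cons, ih, List.count_cons]
    by_cases h1 : x = 1
    · subst h1; simp; ring
    · by_cases h5 : x = 5
      · subst h5; simp; ring
      · simp [h1, h5]

lemma puntos_getD (x : Int) :
    PySem.Dict.getD pvPuntos x 0 = (if x = 1 then 100 else if x = 5 then 50 else 0) := by
  by_cases h1 : x = 1
  · subst h1; decide
  · by_cases h5 : x = 5
    · subst h5; decide
    · have e1 : ((1 : Int) == x) = false := beq_eq_false_iff_ne.mpr (Ne.symm h1)
      have e5 : ((5 : Int) == x) = false := beq_eq_false_iff_ne.mpr (Ne.symm h5)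
      simp [pvPuntos, PySem.Dict.getD, PySem.Dict.get?, PySem.Dict.empty, PySem.Dict.insert,
            List.find?, e1, e5, h1, h5]

-- B computes the same count-based value, by strong induction on the length
lemma altB_eq_aux (n : Nat) : ∀ l : List Int, l.length ≤ n →
    puntuar_alt l = 100 * (l.count 1 : Int) + 50 * (l.count 5 : Int) := by
  induction n with
  | zero =>
    intro l h
    have : l = [] := List.length_eq_zero_iff.mp (Nat.le_zero.mp h)
    subst this; rw [puntuar_alt]; simp
  | succ n ih =>
    intro l h
    rw [puntuar_alt]
    by_cases h0 : l.length = 0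
    · have : l = [] := List.length_eq_zero_iff.mp h0
      subst this; simp
    · by_cases h1 : l.length = 1
      · obtain ⟨x, hx⟩ := List.length_eq_one_iff.mp h1
        subst hx
        simp only [List.length_cons, List.length_nil,
          PySem.List.pyGet?_zero_cons, puntos_getD]
        by_cases c1 : x = 1
        · subst c1; simp
        · by_cases c5 : x = 5
          · subst c5; simp
          · simp [c1, c5]
      · simp only [if_neg h0, if_neg h1]
        rw [show PySem.Int.floordiv ((l.length : Int)) 2 = ((l.length / 2 : Nat) : Int) from
              PySem.Int.floordiv_natCast _ 2,
            PySem.List.slice_to_natCast, PySem.List.slice_from_natCast]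
        rw [ih _ (by simp only [List.length_take]; omega),
            ih _ (by simp only [List.length_drop]; omega)]
        have c1 := congrArg (List.count 1) (List.take_append_drop (l.length / 2) l)
        have c5 := congrArg (List.count 5) (List.take_append_drop (l.length / 2) l)
        rw [List.count_append] at c1 c5
        push_cast [← c1, ← c5]
        ring

lemma altB_eq (l : List Int) :
    puntuar_alt l = 100 * (l.count 1 : Int) + 50 * (l.count 5 : Int) :=
  altB_eq_aux l.length l le_rfl

-- ===== VERDICT (by name: the statement is the Claim_ definition above) =====
theorem puntuar_spec : Claim_equal_puntuar := by
  intro lista _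
  unfold Spec_puntuar puntuar
  rw [altB_eq, foldA_eq]
  ring
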